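-- pv_equiv track=rewrite | github.com/vipinsaini27/DSAlgo | Day 79 - Dynamic Programming IV/N digit numbers.py | solve
-- ===== SOURCE A (Python) =====
-- def solve(A, B):
--     dp = [[0]*(B+1) for _ in range(A+1)]
--
--     dp[0][0] = 1
--
--     for i in range(1, A+1):
--         for j in range(1, B+1):
--             for x in range(0, 10):
--                 if j-x >= 0:
--                     dp[i][j] = (dp[i][j] + dp[i-1][j-x]) % 1000000007
--                 else:
--                     break
--
--     return dp[A][B]
-- ===== SOURCE B (Python) =====
-- def solve(A, B):
--     MOD = 1000000007
--     row = [1] + [0] * B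
--     for _ in range(A):
--         pre = []
--         s = 0
--         first = True
--         for v in row:
--             if first:
--                 s = v
--                 first = False
--             else:
--                 s = (s + v) % MOD
--             pre.append(s)
--         row = [0] + [(pre[j] - (pre[j - 10] if j >= 10 else 0)) % MOD
--                      for j in range(1, B + 1)]
--     return row[B]
-- ===== Notes on version B (the rewrite author's own statement) =====
-- stated objective: faster
-- what changed: Replaces the 2-D DP table with its 10-term inner digit loop by a single rolling row recomputed each step via a prefix-sum pass, so each cell is a sliding-window difference pre[j]-pre[j-10] instead of a sum over 10 digits.
import Mathlib
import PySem

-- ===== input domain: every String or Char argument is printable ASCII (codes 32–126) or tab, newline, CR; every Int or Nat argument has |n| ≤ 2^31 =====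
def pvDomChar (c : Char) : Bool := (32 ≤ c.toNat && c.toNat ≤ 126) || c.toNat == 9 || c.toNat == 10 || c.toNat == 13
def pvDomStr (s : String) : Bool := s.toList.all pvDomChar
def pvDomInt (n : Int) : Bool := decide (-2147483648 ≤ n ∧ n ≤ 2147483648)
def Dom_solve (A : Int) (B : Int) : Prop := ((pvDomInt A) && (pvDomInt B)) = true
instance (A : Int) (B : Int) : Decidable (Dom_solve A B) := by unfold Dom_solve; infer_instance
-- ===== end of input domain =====

-- B replaces A's 2-D DP table and 10-term inner digit loop by a single rolling row
-- recomputed per step from a running prefix-sum pass (sliding-window difference): a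
-- constant-factor faster algorithm with O(B) memory; return values agree on A ≥ 0, B ≥ 0.

-- ===== PORT A =====
-- inner 'for x in range(0, 10)' loop with its break (j - x < 0 stops the loop)
def pvLoopX (prev : List Int) (j : Int) : Int → List Int → Int
  | acc, [] => acc
  | acc, x :: rest =>
    if j - x ≥ 0 then
      pvLoopX prev j (PySem.Int.mod (acc + PySem.List.pyGetD prev (j - x) 0) 1000000007) rest
    else acc

def solve (A : Int) (B : Int) : Int :=
  let dp0 : List (List Int) :=
    (PySem.List.pyRange 0 (A + 1) 1).map (fun _ => PySem.List.pyRepeat [(0 : Int)] (B + 1));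
  let dp1 := PySem.List.pySetD dp0 0 (PySem.List.pySetD (PySem.List.pyGetD dp0 0 []) 0 1);
  let dp2 := (PySem.List.pyRange 1 (A + 1) 1).foldl (fun dp i =>
      (PySem.List.pyRange 1 (B + 1) 1).foldl (fun dp j =>
        PySem.List.pySetD dp i
          (PySem.List.pySetD (PySem.List.pyGetD dp i []) j
            (pvLoopX (PySem.List.pyGetD dp (i - 1) []) j
              (PySem.List.pyGetD (PySem.List.pyGetD dp i []) j 0)
              (PySem.List.pyRange 0 10 1)))) dp) dp1;
  PySem.List.pyGetD (PySem.List.pyGetD dp2 A []) B 0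

-- ===== PORT B =====
-- running prefix sums of row (first element kept as-is, like Source B's first-flag loop)
def pvAccum (s : Int) : List Int → List Int
  | [] => []
  | v :: rest => let s' := PySem.Int.mod (s + v) 1000000007; s' :: pvAccum s' rest

def pvPre : List Int → List Int
  | [] => []
  | v :: rest => v :: pvAccum v rest

def pvStep (B : Int) (row : List Int) : List Int :=
  let pre := pvPre row;
  0 :: (PySem.List.pyRange 1 (B + 1) 1).map (fun j =>
    PySem.Int.mod
      (PySem.List.pyGetD pre j 0 -
        (if j ≥ 10 then PySem.List.pyGetD pre (j - 10) 0 else 0)) 1000000007)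

def solve_alt (A : Int) (B : Int) : Int :=
  let row0 : List Int := 1 :: PySem.List.pyRepeat [(0 : Int)] B;
  let rowF := (PySem.List.pyRange 0 A 1).foldl (fun row _ => pvStep B row) row0;
  PySem.List.pyGetD rowF B 0

-- ===== PRECONDITION & SPEC =====
-- Pre_ excludes A < 0 or B < 0, where the Python A raises IndexError (dp or its rows are empty).
def Pre_solve (A : Int) (B : Int) : Prop := 0 ≤ A ∧ 0 ≤ B
instance (A : Int) (B : Int) : Decidable (Pre_solve A B) := by unfold Pre_solve; infer_instance
def pvWitness_solve : Int × Int := (3, 5)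

def Spec_solve (A : Int) (B : Int) (out : Int) : Prop := out = solve_alt A B
instance (A : Int) (B : Int) (out : Int) : Decidable (Spec_solve A B out) := by unfold Spec_solve; infer_instance

-- ===== CLAIM (what is proved, stated in full; the proofs are below) =====
def Claim_equal_solve : Prop := ∀ (A : Int) (B : Int), Dom_solve A B → Pre_solve A B → Spec_solve A B (solve A B)

-- ===== LEMMAS AND PROOFS =====
lemma pvmod (a : Int) : PySem.Int.mod a 1000000007 = a % 1000000007 :=
  PySem.Int.mod_eq_emod_of_pos (by norm_num)

lemma sum_take_succ (p : List Int) (n : Nat) :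
    (p.take (n+1)).sum = (p.take n).sum + p.getD n 0 := by
  induction p generalizing n with
  | nil => simp [List.getD]
  | cons a q ih =>
    cases n with
    | zero => simp [List.getD]
    | succ m => simp [List.take_succ_cons, List.sum_cons, ih m, List.getD]; ring

lemma pvAccum_getD (rest : List Int) : ∀ (s : Int) (n : Nat), n < rest.length →
    (pvAccum s rest).getD n 0 % 1000000007 = (s + (rest.take (n+1)).sum) % 1000000007 := by
  induction rest with
  | nil => intro s n h; simp at h
  | cons v r ih =>
    intro s n h
    cases n with
    | zero =>
      simp [pvAccum, List.getD, Int.emod_emod_of_dvd _ dvd_rfl]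
    | succ m =>
      have hm : m < r.length := by simpa using h
      simp only [pvAccum, pvmod, List.getD_cons_succ]
      rw [ih _ m hm, Int.emod_add_emod]
      simp [List.take_succ_cons]; ring_nf

lemma pvPre_getD (p : List Int) (n : Nat) (h : n < p.length) :
    (pvPre p).getD n 0 % 1000000007 = (p.take (n+1)).sum % 1000000007 := by
  cases p with
  | nil => simp at h
  | cons v r =>
    cases n with
    | zero => simp [pvPre, List.getD]
    | succ m =>
      have hm : m < r.length := by simpa using h
      simp only [pvPre, List.getD_cons_succ]
      rw [pvAccum_getD r v m hm]
      simp [List.take_succ_cons]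

lemma pvLoopX_run (p : List Int) (j : Int) : ∀ (xs : List Int) (acc : Int), xs ≠ [] →
    (∀ x ∈ xs, j - x ≥ 0) →
    pvLoopX p j acc xs =
      (acc + (xs.map (fun x => PySem.List.pyGetD p (j - x) 0)).sum) % 1000000007 := by
  intro xs
  induction xs with
  | nil => intro acc h; simp at h
  | cons x rest ih =>
    intro acc _ hall
    have hx : j - x ≥ 0 := hall x (by simp)
    rw [pvLoopX, if_pos hx]
    cases rest with
    | nil => simp [pvLoopX]
    | cons y r =>
      rw [ih _ (by simp) (fun z hz => hall z (by simp [hz]))]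
      rw [pvmod, Int.emod_add_emod]
      simp; ring_nf

lemma pvLoopX_break (p : List Int) (j : Int) (z : Int) (zs : List Int) (hz : ¬ j - z ≥ 0) :
    ∀ (ys : List Int) (acc : Int), (∀ x ∈ ys, j - x ≥ 0) →
    pvLoopX p j acc (ys ++ z :: zs) = pvLoopX p j acc ys := by
  intro ys
  induction ys with
  | nil =>
    intro acc _
    simp only [List.nil_append, pvLoopX]
    rw [if_neg hz]
  | cons x rest ih =>
    intro acc hall
    have hx : j - x ≥ 0 := hall x (by simp)
    rw [List.cons_append, pvLoopX, if_pos hx, pvLoopX, if_pos hx]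
    exact ih _ (fun y hy => hall y (by simp [hy]))

lemma winsum (p : List Int) (n : Nat) : ∀ (k : Nat), k ≤ n →
    ((List.range (k+1)).map (fun x => p.getD (n - x) 0)).sum =
      (p.take (n+1)).sum - (p.take (n-k)).sum := by
  intro k
  induction k with
  | zero => intro _; simp [sum_take_succ p n]
  | succ m ih =>
    intro h
    rw [List.range_succ, List.map_append, List.sum_append, ih (by omega)]
    set t := n - (m+1) with ht
    have h2 : n - m = t + 1 := by omega
    rw [h2, sum_take_succ p t]
    simp only [List.map_cons, List.map_nil, List.sum_cons, List.sum_nil, add_zero]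
    ring

lemma pvRange10 : PySem.List.pyRange 0 10 1 = (List.range 10).map (fun k : Nat => (k:Int)) := by
  decide

lemma pvLoopX_core (p : List Int) (n : Nat) (hn1 : 1 ≤ n) :
    pvLoopX p (n:Int) 0 (PySem.List.pyRange 0 10 1) =
      ((p.take (n+1)).sum - (p.take (n-9)).sum) % 1000000007 := by
  by_cases h9 : 9 ≤ n
  · rw [pvLoopX_run p (n:Int) _ 0 (by decide)
      (by intro x hx; rw [PySem.List.mem_pyRange_one] at hx; omega)]
    rw [pvRange10, List.map_map]
    have hmap : ((List.range 10).map ((fun x : Int => PySem.List.pyGetD p ((n:Int) - x) 0) ∘ (fun k : Nat => (k:Int)))).sum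
        = ((List.range 10).map (fun x : Nat => p.getD (n - x) 0)).sum := by
      congr 1
      apply List.map_congr_left
      intro x hx
      rw [List.mem_range] at hx
      have hc : ((n:Int) - (x:Int)) = ((n - x : Nat) : Int) := by omega
      simp only [Function.comp]
      rw [hc, PySem.List.pyGetD_natCast]
    rw [hmap]
    have hw := winsum p n 9 h9
    rw [show (9:Nat)+1 = 10 from rfl] at hw
    rw [hw]; ring_nf
  · have hsplit : PySem.List.pyRange 0 10 1 =
        PySem.List.pyRange 0 ((n:Int)+1) 1 ++ PySem.List.pyRange ((n:Int)+1) 10 1 :=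
      PySem.List.pyRange_one_append 0 ((n:Int)+1) 10 (by omega) (by omega)
    have hcons : PySem.List.pyRange ((n:Int)+1) 10 1 = ((n:Int)+1) :: PySem.List.pyRange ((n:Int)+2) 10 1 := by
      rw [PySem.List.pyRange_one_cons (by omega)]; ring_nf
    rw [hsplit, hcons, pvLoopX_break p (n:Int) ((n:Int)+1) _ (by omega) _ 0
      (by intro x hx; rw [PySem.List.mem_pyRange_one] at hx; omega)]
    rw [pvLoopX_run p (n:Int) _ 0
      (by rw [PySem.List.pyRange_one_cons (by omega)]; exact List.cons_ne_nil _ _)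
      (by intro x hx; rw [PySem.List.mem_pyRange_one] at hx; omega)]
    have hr : PySem.List.pyRange 0 ((n:Int)+1) 1 = (List.range (n+1)).map (fun k : Nat => (k:Int)) := by
      rw [PySem.List.pyRange_one]
      have h1 : ((n:Int) + 1 - 0).toNat = n + 1 := by omega
      rw [h1]
      apply List.map_congr_left
      intro x _
      omega
    rw [hr, List.map_map]
    have hmap : ((List.range (n+1)).map ((fun x : Int => PySem.List.pyGetD p ((n:Int) - x) 0) ∘ (fun k : Nat => (k:Int)))).sum
        = ((List.range (n+1)).map (fun x : Nat => p.getD (n - x) 0)).sum := by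
      congr 1
      apply List.map_congr_left
      intro x hx
      rw [List.mem_range] at hx
      have hc : ((n:Int) - (x:Int)) = ((n - x : Nat) : Int) := by omega
      simp only [Function.comp]
      rw [hc, PySem.List.pyGetD_natCast]
    rw [hmap, winsum p n n (le_refl n)]
    rw [Nat.sub_eq_zero_of_le (by omega : n ≤ 9), Nat.sub_self]
    simp

lemma pvStep_body (p : List Int) (b n : Nat) (h2 : n ≤ b) (hlen : p.length = b+1) :
    PySem.Int.mod (PySem.List.pyGetD (pvPre p) ((n:Int)) 0 -
        (if ((n:Int)) ≥ 10 then PySem.List.pyGetD (pvPre p) ((n:Int) - 10) 0 else 0)) 1000000007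
      = ((p.take (n+1)).sum - (p.take (n-9)).sum) % 1000000007 := by
  by_cases h10 : 10 ≤ n
  · rw [if_pos (show ((n:Int)) ≥ 10 by omega)]
    have hc : ((n:Int) - 10) = ((n - 10 : Nat):Int) := by omega
    rw [hc, PySem.List.pyGetD_natCast, PySem.List.pyGetD_natCast, pvmod, Int.sub_emod,
      pvPre_getD p n (by omega), pvPre_getD p (n-10) (by omega), ← Int.sub_emod]
    have h11 : n - 10 + 1 = n - 9 := by omega
    rw [h11]
  · rw [if_neg (by omega), sub_zero, pvmod, PySem.List.pyGetD_natCast]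
    rw [Nat.sub_eq_zero_of_le (by omega : n ≤ 9)]
    simp only [List.take_zero, List.sum_nil, sub_zero]
    exact pvPre_getD p n (by omega)

lemma jfold_gen (p : List Int) : ∀ (n t : Nat) (c : List Int), c.length = t →
    ((List.range n).map (fun k : Nat => ((t:Int) + (k:Int)))).foldl
      (fun cur j => PySem.List.pySetD cur j
        (pvLoopX p j (PySem.List.pyGetD cur j 0) (PySem.List.pyRange 0 10 1)))
      (c ++ List.replicate n 0)
    = c ++ (List.range n).map (fun k : Nat => pvLoopX p ((t:Int) + (k:Int)) 0 (PySem.List.pyRange 0 10 1)) := by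
  intro n
  induction n with
  | zero => intro t c _; simp
  | succ m ih =>
    intro t c hc
    rw [List.range_succ_eq_map, List.map_cons, List.replicate_succ, List.foldl_cons]
    have hget : PySem.List.pyGetD (c ++ 0 :: List.replicate m 0) ((t:Int) + ((0:Nat):Int)) 0 = 0 := by
      simp only [Nat.cast_zero, add_zero]
      rw [show ((t:Int)) = (((t:Nat)):Int) from rfl, PySem.List.pyGetD_natCast, ← hc]
      simp [List.getD]
    have hset : ∀ v : Int, PySem.List.pySetD (c ++ 0 :: List.replicate m 0) ((t:Int) + ((0:Nat):Int)) v
        = (c ++ [v]) ++ List.replicate m 0 := by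
      intro v
      simp only [Nat.cast_zero, add_zero]
      rw [show ((t:Int)) = (((t:Nat)):Int) from rfl, PySem.List.pySetD_natCast, ← hc]
      simp
    rw [hget, hset]
    have hfun : (List.map Nat.succ (List.range m)).map (fun k : Nat => ((t:Int) + (k:Int)))
        = (List.range m).map (fun k : Nat => (((t+1:Nat):Int) + (k:Int))) := by
      rw [List.map_map]
      apply List.map_congr_left
      intro x _
      simp only [Function.comp]
      push_cast
      ring
    rw [hfun, ih (t+1) (c ++ [pvLoopX p ((t:Int) + ((0:Nat):Int)) 0 (PySem.List.pyRange 0 10 1)]) (by simp [hc])]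
    rw [List.append_assoc, List.singleton_append]
    congr 1
    rw [List.map_cons]
    congr 1
    rw [List.map_map]
    apply List.map_congr_left
    intro x _
    simp only [Function.comp]
    congr 1
    push_cast
    ring

lemma pvRange_one_b (b : Nat) : PySem.List.pyRange 1 ((b:Int)+1) 1
    = (List.range b).map (fun k : Nat => (((1:Nat)):Int) + (k:Int)) := by
  rw [PySem.List.pyRange_one]
  have h : ((b:Int) + 1 - 1).toNat = b := by omega
  rw [h]
  apply List.map_congr_left
  intro x _
  simp

lemma jrow (b : Nat) (p : List Int) (hp : p.length = b+1) :
    (PySem.List.pyRange 1 ((b:Int)+1) 1).foldl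
      (fun cur j => PySem.List.pySetD cur j
        (pvLoopX p j (PySem.List.pyGetD cur j 0) (PySem.List.pyRange 0 10 1)))
      (List.replicate (b+1) 0)
    = pvStep (b:Int) p := by
  have hrep : List.replicate (b+1) (0:Int) = [0] ++ List.replicate b 0 := by
    simp [List.replicate_succ]
  rw [pvRange_one_b, hrep, jfold_gen p b 1 [0] rfl]
  unfold pvStep
  rw [List.singleton_append]
  congr 1
  rw [pvRange_one_b, List.map_map]
  apply List.map_congr_left
  intro k hk
  rw [List.mem_range] at hk
  simp only [Function.comp]
  have hc : (((1:Nat)):Int) + (k:Int) = (((1+k:Nat)):Int) := by push_cast; ring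
  rw [hc, pvLoopX_core p (1+k) (by omega), pvStep_body p b (1+k) (by omega) hp]

lemma jlift (ti : Nat) (h1 : 1 ≤ ti) :
    ∀ (js : List Int) (dp : List (List Int)) (r : List Int), ti < dp.length →
    js.foldl (fun dp j => PySem.List.pySetD dp ((ti:Int))
        (PySem.List.pySetD (PySem.List.pyGetD dp ((ti:Int)) []) j
          (pvLoopX (PySem.List.pyGetD dp ((ti:Int) - 1) []) j
            (PySem.List.pyGetD (PySem.List.pyGetD dp ((ti:Int)) []) j 0)
            (PySem.List.pyRange 0 10 1)))) (PySem.List.pySetD dp ((ti:Int)) r)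
    = PySem.List.pySetD dp ((ti:Int))
        (js.foldl (fun cur j => PySem.List.pySetD cur j
          (pvLoopX (PySem.List.pyGetD dp ((ti:Int) - 1) []) j
            (PySem.List.pyGetD cur j 0) (PySem.List.pyRange 0 10 1))) r) := by
  intro js
  induction js with
  | nil => intro dp r _; simp
  | cons j js ih =>
    intro dp r hlen
    rw [List.foldl_cons, List.foldl_cons]
    have e1 : PySem.List.pyGetD (PySem.List.pySetD dp ((ti:Int)) r) ((ti:Int)) [] = r := by
      rw [PySem.List.pyGetD_pySetD_natCast dp ti ti r [] hlen]
      simp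
    have e2 : PySem.List.pyGetD (PySem.List.pySetD dp ((ti:Int)) r) ((ti:Int) - 1) []
        = PySem.List.pyGetD dp ((ti:Int) - 1) [] := by
      have hc : ((ti:Int) - 1) = (((ti-1:Nat)):Int) := by omega
      rw [hc, PySem.List.pyGetD_pySetD_natCast dp ti (ti-1) r [] hlen]
      rw [if_neg (by omega)]
    have e3 : ∀ v, PySem.List.pySetD (PySem.List.pySetD dp ((ti:Int)) r) ((ti:Int)) v
        = PySem.List.pySetD dp ((ti:Int)) v := by
      intro v
      simp [List.set_set]
    rw [e1, e2, e3, ih dp _ hlen]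

def pvRow (b : Nat) : Nat → List Int := fun t => (fun r => pvStep (b:Int) r)^[t] (1 :: List.replicate b 0)

lemma pvRow_zero (b : Nat) : pvRow b 0 = 1 :: List.replicate b 0 := rfl

lemma pvRow_succ (b t : Nat) : pvRow b (t+1) = pvStep (b:Int) (pvRow b t) :=
  Function.iterate_succ_apply' _ _ _

lemma pvStep_len (b : Nat) (r : List Int) : (pvStep (b:Int) r).length = b + 1 := by
  simp [pvStep, PySem.List.length_pyRange_one]

lemma pvRow_len (b t : Nat) : (pvRow b t).length = b + 1 := by
  induction t with
  | zero => simp [pvRow_zero]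
  | succ q ih => rw [pvRow_succ]; exact pvStep_len b _

lemma ifold (b : Nat) : ∀ (n t m : Nat), 1 ≤ t → n ≤ m →
    ((List.range n).map (fun k : Nat => ((t:Int) + (k:Int)))).foldl
      (fun dp i => (PySem.List.pyRange 1 ((b:Int)+1) 1).foldl
        (fun dp j => PySem.List.pySetD dp i
          (PySem.List.pySetD (PySem.List.pyGetD dp i []) j
            (pvLoopX (PySem.List.pyGetD dp (i-1) []) j
              (PySem.List.pyGetD (PySem.List.pyGetD dp i []) j 0)
              (PySem.List.pyRange 0 10 1)))) dp)
      ((List.range t).map (pvRow b) ++ List.replicate m (List.replicate (b+1) 0))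
    = (List.range (t+n)).map (pvRow b) ++ List.replicate (m-n) (List.replicate (b+1) 0) := by
  intro n
  induction n with
  | zero => intro t m _ _; simp
  | succ q ih =>
    intro t m h1 hnm
    obtain ⟨m', rfl⟩ : ∃ m', m = m' + 1 := ⟨m - 1, by omega⟩
    rw [List.range_succ_eq_map, List.map_cons, List.foldl_cons]
    simp only [Nat.cast_zero, add_zero]
    set C := (List.range t).map (pvRow b) with hC
    have hClen : C.length = t := by simp [hC]
    set zrow : List Int := List.replicate (b+1) 0 with hz
    have hdplen : (C ++ List.replicate (m'+1) zrow).length = t + (m'+1) := by simp [hClen]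
    have hstart : C ++ List.replicate (m'+1) zrow
        = PySem.List.pySetD (C ++ List.replicate (m'+1) zrow) ((t:Int)) zrow := by
      rw [PySem.List.pySetD_natCast, ← hClen]
      rw [List.set_append_right _ _ (by omega)]
      simp [List.replicate_succ]
    rw [hstart, jlift t h1 _ _ _ (by omega)]
    have hprev : PySem.List.pyGetD (C ++ List.replicate (m'+1) zrow) ((t:Int) - 1) [] = pvRow b (t-1) := by
      have hc : ((t:Int) - 1) = (((t-1:Nat)):Int) := by omega
      rw [hc, PySem.List.pyGetD_natCast]
      rw [List.getD_append _ _ _ _ (by omega)]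
      simp [hC, List.getD, List.getElem?_map, List.getElem?_range (by omega : t-1 < t)]
    rw [hprev, jrow b (pvRow b (t-1)) (pvRow_len b (t-1))]
    have hrow : pvStep ((b:Int)) (pvRow b (t-1)) = pvRow b t := by
      rw [← pvRow_succ]
      congr 1
      omega
    rw [hrow]
    have hset : PySem.List.pySetD (C ++ List.replicate (m'+1) zrow) ((t:Int)) (pvRow b t)
        = (List.range (t+1)).map (pvRow b) ++ List.replicate m' zrow := by
      rw [PySem.List.pySetD_natCast, ← hClen, List.set_append_right _ _ (by omega)]
      rw [List.range_succ, List.map_append]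
      simp [List.replicate_succ, hClen]
      exact hC
    rw [hset]
    have hfun : (List.map Nat.succ (List.range q)).map (fun k : Nat => ((t:Int) + (k:Int)))
        = (List.range q).map (fun k : Nat => (((t+1:Nat)):Int) + (k:Int)) := by
      rw [List.map_map]
      apply List.map_congr_left
      intro x _
      simp only [Function.comp]
      push_cast
      ring
    rw [hfun, ih (t+1) m' (by omega) (by omega)]
    have e1 : t + 1 + q = t + (q+1) := by omega
    have e2 : m' - q = m' + 1 - (q+1) := by omega
    rw [e1, e2]

lemma foldl_const {α γ : Type} (f : α → α) : ∀ (l : List γ) (x : α),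
    l.foldl (fun acc _ => f acc) x = f^[l.length] x := by
  intro l
  induction l with
  | nil => intro x; simp
  | cons y ys ih =>
    intro x
    rw [List.foldl_cons, ih, List.length_cons, Function.iterate_succ_apply]

lemma pyRepeat_row (b : Nat) : PySem.List.pyRepeat [(0:Int)] ((b:Int) + 1) = List.replicate (b+1) 0 := by
  rw [PySem.List.pyRepeat_singleton, show (((b:Int)) + 1).toNat = b + 1 from by omega]

lemma solveB_eq (a b : Nat) : solve_alt (a:Int) (b:Int) = (pvRow b a).getD b 0 := by
  unfold solve_alt
  dsimp only
  rw [show PySem.List.pyRepeat [(0:Int)] ((b:Nat):Int) = List.replicate b 0 by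
    rw [PySem.List.pyRepeat_singleton, show (((b:Nat):Int)).toNat = b from by omega]]
  rw [foldl_const (fun r => pvStep ((b:Nat):Int) r)]
  rw [PySem.List.length_pyRange_one]
  rw [show (((a:Nat):Int) - 0).toNat = a by omega]
  rw [PySem.List.pyGetD_natCast]
  rfl

lemma solveA_eq (a b : Nat) : solve (a:Int) (b:Int) = (pvRow b a).getD b 0 := by
  unfold solve
  dsimp only
  have hdp0 : (PySem.List.pyRange 0 ((a:Int) + 1) 1).map (fun _ => PySem.List.pyRepeat [(0 : Int)] ((b:Int) + 1))
      = List.replicate (a+1) (List.replicate (b+1) 0) := by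
    rw [List.map_const']
    rw [PySem.List.length_pyRange_one, pyRepeat_row,
      show (((a:Int)) + 1 - 0).toNat = a + 1 from by omega]
  rw [hdp0]
  have hdp1 : PySem.List.pySetD (List.replicate (a+1) (List.replicate (b+1) 0)) 0
        (PySem.List.pySetD (PySem.List.pyGetD (List.replicate (a+1) (List.replicate (b+1) 0)) 0 []) 0 1)
      = (List.range 1).map (pvRow b) ++ List.replicate a (List.replicate (b+1) 0) := by
    rw [List.replicate_succ]
    rw [PySem.List.pyGetD_zero_cons]
    rw [show ((0:Int)) = (((0:Nat)):Int) from rfl, PySem.List.pySetD_natCast, PySem.List.pySetD_natCast]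
    rw [List.replicate_succ, List.set_cons_zero, List.set_cons_zero]
    simp [pvRow_zero]
  rw [hdp1]
  rw [pvRange_one_b a]
  rw [ifold b a 1 a (by omega) (le_refl a)]
  rw [Nat.sub_self, List.replicate_zero, List.append_nil]
  rw [PySem.List.pyGetD_natCast, PySem.List.pyGetD_natCast]
  rw [show 1 + a = a + 1 from by omega]
  have hlast : (List.map (pvRow b) (List.range (a+1))).getD a [] = pvRow b a := by
    rw [List.getD, List.getElem?_map, List.getElem?_range (by omega : a < a+1)]
    rfl
  rw [hlast]

theorem solve_eq_alt (A B : Int) (hA : 0 ≤ A) (hB : 0 ≤ B) : solve A B = solve_alt A B := by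
  obtain ⟨a, rfl⟩ : ∃ a : Nat, A = (a:Int) := ⟨A.toNat, by omega⟩
  obtain ⟨b, rfl⟩ : ∃ b : Nat, B = (b:Int) := ⟨B.toNat, by omega⟩
  rw [solveA_eq, solveB_eq]

-- ===== VERDICT (by name: the statement is the Claim_ definition above) =====
theorem solve_spec : Claim_equal_solve := by
  intro A B _ hpre
  unfold Spec_solve
  exact solve_eq_alt A B hpre.1 hpre.2
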